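-- pv_equiv track=rewrite | github.com/Viktor-Bubanja/Pretty-Good-Diff | src/str_diff_dynamic_programming.py | find_best_solution
-- ===== SOURCE A (Python) =====
-- def find_best_solution(matrix):
--     max_value = 0
--     separateness_of_best_solution = float("inf")
--     max_index = 0, 0
--
--     for i in range(len(matrix)):
--         for j in range(len(matrix[i])):
--             if len(matrix[i][j]) >= max_value:
--                 separateness = calculate_separatedness(matrix[i][j])
--                 if len(matrix[i][j]) == max_value:
--                     if separateness >= separateness_of_best_solution:
--                         continue
--                 max_value = len(matrix[i][j])
--                 max_index = (i, j)
--                 separateness_of_best_solution = separateness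
--
--     return matrix[max_index[0]][max_index[1]]
--
-- def calculate_separatedness(mapped_indexes):
--     if not mapped_indexes:
--         return 0
--     first_str_indexes, second_str_indexes = zip(*mapped_indexes)
--     return sum(
--         first_str_indexes[i+1] - first_str_indexes[i] for i in range(len(first_str_indexes) - 1)
--     ) + sum(
--         second_str_indexes[i+1] - second_str_indexes[i] for i in range(len(second_str_indexes) - 1)
--     )
-- ===== SOURCE B (Python) =====
-- def find_best_solution(matrix):
--     def separateness(cell):
--         # consecutive-difference sums telescope: last - first in each coordinate
--         if not cell:
--             return 0
--         return (cell[-1][0] - cell[0][0]) + (cell[-1][1] - cell[0][1])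
--
--     cells = [cell for row in matrix for cell in row]
--     return min(cells, key=lambda c: (-len(c), separateness(c)))
-- ===== Notes on version B (the rewrite author's own statement) =====
-- stated objective: simpler
-- what changed: Replaces the stateful four-variable argmax scan with a flatten + single min() under the lexicographic key (-len, separateness), and replaces the consecutive-difference sums in separateness by their telescoped closed form last-first per coordinate.
import Mathlib
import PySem

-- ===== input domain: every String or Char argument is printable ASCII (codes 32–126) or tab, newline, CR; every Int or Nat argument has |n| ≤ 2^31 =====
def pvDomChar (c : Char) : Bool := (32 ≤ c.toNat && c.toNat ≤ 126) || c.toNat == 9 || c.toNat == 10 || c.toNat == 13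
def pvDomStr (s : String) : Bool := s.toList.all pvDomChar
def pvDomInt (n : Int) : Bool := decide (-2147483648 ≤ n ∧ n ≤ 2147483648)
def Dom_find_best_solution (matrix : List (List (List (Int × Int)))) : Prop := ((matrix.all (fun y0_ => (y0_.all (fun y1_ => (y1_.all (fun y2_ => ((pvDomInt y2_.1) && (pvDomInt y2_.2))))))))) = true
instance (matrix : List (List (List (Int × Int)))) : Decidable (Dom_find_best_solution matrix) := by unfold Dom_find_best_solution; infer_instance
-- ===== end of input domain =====

-- B flattens the matrix and takes one min() under the lexicographic key (-len, separateness),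
-- with the consecutive-difference sums of separateness telescoped to last-first per coordinate (objective: simpler).

-- ===== PORT A =====

-- port of calculate_separatedness: zip(*mapped_indexes) = the two projection lists
def calcSep (mapped_indexes : List (Int × Int)) : Int :=
  if mapped_indexes = [] then 0
  else
    let first_str_indexes := mapped_indexes.map Prod.fst
    let second_str_indexes := mapped_indexes.map Prod.snd
    ((List.range (first_str_indexes.length - 1)).map
      (fun i => first_str_indexes.getD (i + 1) 0 - first_str_indexes.getD i 0)).sum +
    ((List.range (second_str_indexes.length - 1)).map
      (fun i => second_str_indexes.getD (i + 1) 0 - second_str_indexes.getD i 0)).sum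

-- the body of A's inner loop, on state (max_value, separateness_of_best_solution, max_index);
-- float("inf") is modelled as `none` (nothing compares >= to it, and it is overwritten at the first cell)
def cellStep (i : Int) (st : Int × Option Int × (Int × Int))
    (q : Int × List (Int × Int)) : Int × Option Int × (Int × Int) :=
  if st.1 ≤ (q.2.length : Int) then
    let sep := calcSep q.2
    if (decide ((q.2.length : Int) = st.1) &&
        (match st.2.1 with | none => false | some s => decide (s ≤ sep))) = true then st
    else ((q.2.length : Int), some sep, (i, q.1))
  else st

-- 'for i in range(len(matrix))' with 'matrix[i]' is the enumeration of matrix (same for the inner loop)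
def find_best_solution (matrix : List (List (List (Int × Int)))) : List (Int × Int) :=
  let st := (PySem.List.enumerate matrix 0).foldl
      (fun st p => (PySem.List.enumerate p.2 0).foldl (cellStep p.1) st)
      ((0 : Int), (none : Option Int), ((0 : Int), (0 : Int)))
  -- final 'matrix[max_index[0]][max_index[1]]'; .getD []: Pre_ excludes the IndexError case
  ((PySem.List.pyGet? matrix st.2.2.1).bind (fun row => PySem.List.pyGet? row st.2.2.2)).getD []

-- ===== PORT B =====

-- cell[-1] / cell[0] on the (guarded) nonempty cell are getLast? / head?
def sepAlt (cell : List (Int × Int)) : Int :=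
  if cell = [] then 0
  else ((cell.getLast?.getD (0, 0)).1 - (cell.head?.getD (0, 0)).1) +
       ((cell.getLast?.getD (0, 0)).2 - (cell.head?.getD (0, 0)).2)

def find_best_solution_alt (matrix : List (List (List (Int × Int)))) : List (Int × Int) :=
  let cells := matrix.flatMap id
  -- min(cells, key=lambda c: (-len(c), separateness(c))); .getD []: Pre_ excludes the ValueError case
  (PySem.List.min2? cells (fun c => -(c.length : Int)) sepAlt).getD []

-- ===== PRECONDITION & SPEC =====
-- Pre_ excludes exactly the matrices without any cell, on which A raises IndexError (and B ValueError)
def Pre_find_best_solution (matrix : List (List (List (Int × Int)))) : Prop :=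
  (matrix.any (fun row => !row.isEmpty)) = true
instance (matrix : List (List (List (Int × Int)))) : Decidable (Pre_find_best_solution matrix) := by
  unfold Pre_find_best_solution; infer_instance

def pvWitness_find_best_solution : (List (List (List (Int × Int)))) := [[[((0 : Int), (0 : Int))]]]

def Spec_find_best_solution (matrix : List (List (List (Int × Int)))) (out : List (Int × Int)) : Prop := out = find_best_solution_alt matrix
instance (matrix : List (List (List (Int × Int)))) (out : List (Int × Int)) : Decidable (Spec_find_best_solution matrix out) := by unfold Spec_find_best_solution; infer_instance

-- ===== CLAIM (what is proved, stated in full; the proofs are below) =====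
def Claim_equal_find_best_solution : Prop := ∀ (matrix : List (List (List (Int × Int)))), Dom_find_best_solution matrix → Pre_find_best_solution matrix → Spec_find_best_solution matrix (find_best_solution matrix)

-- ===== LEMMAS AND PROOFS =====

theorem telescope_sum (f : Nat → Int) (n : Nat) :
    ((List.range n).map (fun i => f (i + 1) - f i)).sum = f n - f 0 := by
  induction n with
  | zero => simp
  | succ n ih => rw [List.range_succ]; simp [ih]

theorem getD_last_fst (l : List (Int × Int)) :
    (l.map Prod.fst).getD (l.length - 1) 0 = (l.getLast?.getD (0, 0)).1 := by
  rw [List.getD_eq_getElem?_getD, List.getElem?_map, ← List.getLast?_eq_getElem?]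
  cases l.getLast? <;> simp

theorem getD_last_snd (l : List (Int × Int)) :
    (l.map Prod.snd).getD (l.length - 1) 0 = (l.getLast?.getD (0, 0)).2 := by
  rw [List.getD_eq_getElem?_getD, List.getElem?_map, ← List.getLast?_eq_getElem?]
  cases l.getLast? <;> simp

theorem calcSep_eq_sepAlt (cell : List (Int × Int)) : calcSep cell = sepAlt cell := by
  cases cell with
  | nil => rfl
  | cons a t =>
      have h : (a :: t : List (Int × Int)) ≠ [] := by simp
      rw [calcSep, sepAlt, if_neg h, if_neg h]
      simp only [List.length_map]
      rw [telescope_sum (fun i => ((a :: t).map Prod.fst).getD i 0),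
          telescope_sum (fun i => ((a :: t).map Prod.snd).getD i 0)]
      rw [getD_last_fst, getD_last_snd]
      simp only [List.map_cons, List.getD_cons_zero, List.head?_cons, Option.getD_some]

-- lookup matrix[i][j]
def lookup2 (matrix : List (List (List (Int × Int)))) (ij : Int × Int) :
    Option (List (Int × Int)) :=
  (PySem.List.pyGet? matrix ij.1).bind (fun row => PySem.List.pyGet? row ij.2)

-- the fold step of PySem.List.min2? at B's two keys
def stepB (acc : Option (List (Int × Int))) (c : List (Int × Int)) :
    Option (List (Int × Int)) :=
  match acc with
  | none => some c
  | some m =>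
      if (decide (-(c.length : Int) < -(m.length : Int)) ||
          (!decide (-(m.length : Int) < -(c.length : Int)) && decide (sepAlt c < sepAlt m))) = true
      then some c else some m

theorem min2?_eq_foldl_stepB (cells : List (List (Int × Int))) :
    PySem.List.min2? cells (fun c => -(c.length : Int)) sepAlt = cells.foldl stepB none := by
  unfold PySem.List.min2?
  congr 1
  funext acc x
  cases acc <;> rfl

-- the invariant tying A's loop state to the running first-minimum of B
def StInv (matrix : List (List (List (Int × Int))))
    (st : Int × Option Int × (Int × Int)) (acc : Option (List (Int × Int))) : Prop :=
  match acc with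
  | none => st = (0, none, (0, 0))
  | some b => st.1 = (b.length : Int) ∧ st.2.1 = some (calcSep b) ∧ lookup2 matrix st.2.2 = some b

theorem stepB_char (m c : List (Int × Int)) :
    stepB (some m) c =
      if ((m.length : Int) < c.length ∨ ((c.length : Int) = m.length ∧ sepAlt c < sepAlt m))
      then some c else some m := by
  simp only [stepB, Bool.or_eq_true, Bool.and_eq_true, Bool.not_eq_true',
    decide_eq_true_eq, decide_eq_false_iff_not]
  split_ifs with h1 h2 <;> first | rfl | (exfalso; omega)

theorem cellStep_char (i j : Int) (ij : Int × Int) (m c : List (Int × Int)) :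
    cellStep i ((m.length : Int), some (calcSep m), ij) (j, c) =
      if ((m.length : Int) < c.length ∨ ((c.length : Int) = m.length ∧ calcSep c < calcSep m))
      then ((c.length : Int), some (calcSep c), (i, j))
      else ((m.length : Int), some (calcSep m), ij) := by
  simp only [cellStep, Bool.and_eq_true, decide_eq_true_eq]
  split_ifs with h1 h2 h3 <;> first | rfl | (exfalso; omega)

theorem step_compat (matrix : List (List (List (Int × Int))))
    (st : Int × Option Int × (Int × Int)) (acc : Option (List (Int × Int)))
    (i j : Int) (c : List (Int × Int))
    (hR : StInv matrix st acc) (hl : lookup2 matrix (i, j) = some c) :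
    StInv matrix (cellStep i st (j, c)) (stepB acc c) := by
  cases acc with
  | none =>
      simp only [StInv] at hR
      subst hR
      simp only [cellStep, stepB]
      norm_num [StInv, hl]
  | some m =>
      obtain ⟨mv, sb, ij⟩ := st
      obtain ⟨h1, h2, h3⟩ := hR
      simp only at h1 h2 h3
      subst h1; subst h2
      rw [cellStep_char, stepB_char]
      simp only [calcSep_eq_sepAlt]
      split_ifs with h
      · exact ⟨rfl, by rw [calcSep_eq_sepAlt], hl⟩
      · exact ⟨rfl, by rw [calcSep_eq_sepAlt], h3⟩

theorem inner_inv (matrix : List (List (List (Int × Int)))) (i : Int)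
    (l : List (Int × List (Int × Int))) :
    ∀ st acc, StInv matrix st acc → (∀ q ∈ l, lookup2 matrix (i, q.1) = some q.2) →
    StInv matrix (l.foldl (cellStep i) st) (l.foldl (fun a q => stepB a q.2) acc) := by
  induction l with
  | nil => intro st acc h _; exact h
  | cons q t ih =>
      intro st acc h hq
      simp only [List.foldl_cons]
      exact ih _ _ (step_compat matrix st acc i q.1 q.2 h (hq q (by simp)))
        (fun r hr => hq r (by simp [hr]))

theorem foldl_stepB_snd_enumerate (row : List (List (Int × Int))) :
    ∀ (s : Int) (acc : Option (List (Int × Int))),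
    (PySem.List.enumerate row s).foldl (fun a q => stepB a q.2) acc = row.foldl stepB acc := by
  induction row with
  | nil => intro s acc; rfl
  | cons r t ih => intro s acc; rw [PySem.List.enumerate_cons]; simp only [List.foldl_cons]; exact ih _ _

theorem outer_inv (matrix : List (List (List (Int × Int))))
    (rl : List (Int × List (List (Int × Int)))) :
    ∀ st acc, StInv matrix st acc →
    (∀ p ∈ rl, PySem.List.pyGet? matrix p.1 = some p.2) →
    StInv matrix
      (rl.foldl (fun st p => (PySem.List.enumerate p.2 0).foldl (cellStep p.1) st) st)
      (((rl.map (·.2)).flatten).foldl stepB acc) := by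
  induction rl with
  | nil => intro st acc h _; exact h
  | cons p t ih =>
      intro st acc h hp
      simp only [List.foldl_cons, List.map_cons, List.flatten_cons, List.foldl_append]
      rw [← foldl_stepB_snd_enumerate p.2 0 acc]
      have hrow : PySem.List.pyGet? matrix p.1 = some p.2 := hp p (by simp)
      have hq : ∀ q ∈ PySem.List.enumerate p.2 0, lookup2 matrix (p.1, q.1) = some q.2 := by
        intro q hmem
        rw [PySem.List.mem_enumerate_iff] at hmem
        obtain ⟨k, hk, rfl⟩ := hmem
        simp only [lookup2, hrow, Option.bind_some, zero_add]
        simp [PySem.List.pyGet?_natCast, List.getElem?_eq_getElem hk]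
      exact ih _ _ (inner_inv matrix p.1 (PySem.List.enumerate p.2 0) st acc h hq)
        (fun r hr => hp r (by simp [hr]))

theorem foldl_stepB_some (l : List (List (Int × Int))) :
    ∀ x, ∃ b, l.foldl stepB (some x) = some b := by
  induction l with
  | nil => intro x; exact ⟨x, rfl⟩
  | cons c t ih =>
      intro x
      simp only [List.foldl_cons, stepB]
      split <;> exact ih _

-- ===== VERDICT (by name: the statement is the Claim_ definition above) =====
theorem find_best_solution_spec : Claim_equal_find_best_solution := by
  intro matrix _ hpre
  unfold Spec_find_best_solution
  simp only [find_best_solution, find_best_solution_alt]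
  have hp : ∀ p ∈ PySem.List.enumerate matrix 0, PySem.List.pyGet? matrix p.1 = some p.2 := by
    intro p hmem
    rw [PySem.List.mem_enumerate_iff] at hmem
    obtain ⟨k, hk, rfl⟩ := hmem
    simp [PySem.List.pyGet?_natCast, List.getElem?_eq_getElem hk]
  have h0 : StInv matrix ((0 : Int), (none : Option Int), ((0 : Int), (0 : Int))) none := rfl
  have key := outer_inv matrix (PySem.List.enumerate matrix 0) _ none h0 hp
  rw [PySem.List.map_snd_enumerate] at key
  rw [min2?_eq_foldl_stepB, List.flatMap_id]
  obtain ⟨row, hrow, hne⟩ : ∃ row ∈ matrix, row ≠ [] := by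
    unfold Pre_find_best_solution at hpre
    simp only [List.any_eq_true, Bool.not_eq_true', List.isEmpty_eq_false_iff] at hpre
    exact hpre
  have hflat : matrix.flatten ≠ [] := by
    intro hnil
    exact hne ((List.flatten_eq_nil_iff.mp hnil) row hrow)
  obtain ⟨c, rest, hc⟩ : ∃ c rest, matrix.flatten = c :: rest := by
    cases hcf : matrix.flatten with
    | nil => exact absurd hcf hflat
    | cons c rest => exact ⟨c, rest, rfl⟩
  rw [hc] at key ⊢
  simp only [List.foldl_cons] at key ⊢
  have hsome : stepB none c = some c := rfl
  rw [hsome] at key ⊢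
  obtain ⟨b, hb⟩ := foldl_stepB_some rest c
  rw [hb] at key ⊢
  obtain ⟨-, -, hlook⟩ := key
  show (lookup2 matrix _).getD [] = _
  rw [hlook]
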